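-- pv_equiv track=rewrite | github.com/kevinkessler/GarageServerPi | gserv/LEDSModule.py | _grbToSpiData
-- ===== SOURCE A (Python) =====
-- def _grbToSpiData(grb):
--   retbytes = [0] * 9
--   shift_bit = 5
--   idx = 0
--   for x in grb:
--     for b in range(7, -1, -1):
--       if x & 1 << b:
--         bit_pat = 6
--       else:
--         bit_pat = 4
--
--       if shift_bit > -1:
--         retbytes[idx] |= bit_pat << shift_bit
--         shift_bit -= 3
--       else:
--         '''
--         shift bits right to fill out the last of the byte (shift_byte is negitive here)
--         '''
--         retbytes[idx] |= bit_pat >> -shift_bit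
--
--         '''
--         get the remainder by masking out the bits from the last byte (2 ^ bits) -1, and shift
--         the remainder to the front of the next byte
--         '''
--         idx += 1
--         retbytes[idx] |= ((pow(2, -shift_bit) - 1) & bit_pat) << 8 + shift_bit
--         shift_bit = 8 + shift_bit - 3
--
--   return retbytes
-- ===== SOURCE B (Python) =====
-- def _grbToSpiData(grb):
--     ret = [0] * 9
--     for i, x in enumerate(grb):
--         v = 0
--         for b in range(7, -1, -1):
--             v = (v << 3) | (6 if x & (1 << b) else 4)
--         ret[3 * i] = (v >> 16) & 0xFF
--         ret[3 * i + 1] = (v >> 8) & 0xFF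
--         ret[3 * i + 2] = v & 0xFF
--     return ret
-- ===== Notes on version B (the rewrite author's own statement) =====
-- stated objective: simpler
-- what changed: Replaces A's cross-byte shift_bit/idx state machine (with right-shift spill and mask-and-carry into the next byte) by computing each input byte's 24-bit pattern in one MSB-first fold and splitting it into three output bytes at fixed positions 3i..3i+2.
import Mathlib
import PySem

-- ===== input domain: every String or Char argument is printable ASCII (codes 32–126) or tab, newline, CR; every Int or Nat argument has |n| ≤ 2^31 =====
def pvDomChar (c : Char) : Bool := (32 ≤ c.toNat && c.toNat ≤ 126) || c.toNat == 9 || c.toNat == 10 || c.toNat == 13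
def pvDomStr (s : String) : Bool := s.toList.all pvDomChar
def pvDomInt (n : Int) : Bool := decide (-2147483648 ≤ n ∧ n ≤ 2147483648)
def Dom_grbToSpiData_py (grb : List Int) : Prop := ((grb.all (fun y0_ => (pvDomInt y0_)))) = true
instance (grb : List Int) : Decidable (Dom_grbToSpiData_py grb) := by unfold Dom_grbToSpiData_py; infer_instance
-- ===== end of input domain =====

-- B replaces A's cross-byte shift_bit state machine by computing each input byte's 24-bit
-- pattern in one fold and splitting it into 3 output bytes (objective: simpler).

-- ===== PORT A =====
-- one iteration of A's inner loop body, over the state (retbytes, shift_bit, idx);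
-- shifts `x << b`, `bit_pat << shift_bit`, `bit_pat >> -shift_bit` use .toNat on the shift
-- amount, which is nonnegative exactly when Python's shift is (b ∈ 0..7; guarded by the sign
-- tests on shift_bit in the branches), so this is exact.
def grbStepA (x : Int) (st : List Int × Int × Int) (b : Int) : List Int × Int × Int :=
  let ret := st.1
  let shift := st.2.1
  let idx := st.2.2
  let bit_pat : Int := if PySem.Int.band x (1 <<< b.toNat) ≠ 0 then 6 else 4
  if shift > -1 then
    (PySem.List.pySetD ret idx (PySem.Int.bor (PySem.List.pyGetD ret idx 0) (bit_pat <<< shift.toNat)),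
     shift - 3, idx)
  else
    let ret1 := PySem.List.pySetD ret idx
      (PySem.Int.bor (PySem.List.pyGetD ret idx 0) (bit_pat >>> (-shift).toNat))
    let idx1 := idx + 1
    let ret2 := PySem.List.pySetD ret1 idx1
      (PySem.Int.bor (PySem.List.pyGetD ret1 idx1 0)
        (PySem.Int.band ((2 : Int) ^ (-shift).toNat - 1) bit_pat <<< (8 + shift).toNat))
    (ret2, 8 + shift - 3, idx1)

def grbToSpiData_py (grb : List Int) : List Int :=
  (grb.foldl
    (fun st x => (PySem.List.pyRange 7 (-1) (-1)).foldl (grbStepA x) st)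
    ([0, 0, 0, 0, 0, 0, 0, 0, 0], 5, 0)).1

-- ===== PORT B =====
-- v = (v << 3) | (6 if x & (1 << b) else 4), folded over b = 7..0
def grbEncB (x : Int) : Int :=
  (PySem.List.pyRange 7 (-1) (-1)).foldl
    (fun v b => PySem.Int.bor (v <<< 3) (if PySem.Int.band x (1 <<< b.toNat) ≠ 0 then 6 else 4)) 0

def grbToSpiData_py_alt (grb : List Int) : List Int :=
  (PySem.List.enumerate grb).foldl
    (fun ret ix =>
      let v := grbEncB ix.2
      let ret1 := PySem.List.pySetD ret (3 * ix.1) (PySem.Int.band (v >>> 16) 255)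
      let ret2 := PySem.List.pySetD ret1 (3 * ix.1 + 1) (PySem.Int.band (v >>> 8) 255)
      PySem.List.pySetD ret2 (3 * ix.1 + 2) (PySem.Int.band v 255))
    [0, 0, 0, 0, 0, 0, 0, 0, 0]


-- ===== PRECONDITION & SPEC =====
-- A writes 3 output bytes per input byte into a hardcoded 9-byte list, so with more than 3
-- input bytes Python's retbytes[idx] raises IndexError; Pre_ excludes exactly those inputs.
def Pre_grbToSpiData_py (grb : List Int) : Prop := grb.length ≤ 3
instance (grb : List Int) : Decidable (Pre_grbToSpiData_py grb) := by unfold Pre_grbToSpiData_py; infer_instance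
def pvWitness_grbToSpiData_py : List Int := [255, 0, 129]

def Spec_grbToSpiData_py (grb : List Int) (out : List Int) : Prop := out = grbToSpiData_py_alt grb
instance (grb : List Int) (out : List Int) : Decidable (Spec_grbToSpiData_py grb out) := by unfold Spec_grbToSpiData_py; infer_instance

-- ===== CLAIM (what is proved, stated in full; the proofs are below) =====
def Claim_equal_grbToSpiData_py : Prop := ∀ (grb : List Int), Dom_grbToSpiData_py grb → Pre_grbToSpiData_py grb → Spec_grbToSpiData_py grb (grbToSpiData_py grb)

-- ===== LEMMAS AND PROOFS =====
-- Proof plan: both ports' per-input-byte work factors through the list of 3-bit patterns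
-- [pvPat x 7, …, pvPat x 0] (pvStepP is A's loop body with the pattern as argument, pvEnc/
-- pvBytes are B's encoder and byte split).  The 256 combinations of one byte's patterns are
-- discharged by `decide` (core1/coreMid/coreLast); pvFold_cons/pvFold_peel peel already-written
-- list entries off A's state so each byte's processing reduces to a core lemma.
def pvC (t : Bool) : Int := cond t 6 4
def pvPat (x b : Int) : Int := if PySem.Int.band x (1 <<< b.toNat) ≠ 0 then 6 else 4
def pvPats (x : Int) : List Int :=
  [pvPat x 7, pvPat x 6, pvPat x 5, pvPat x 4, pvPat x 3, pvPat x 2, pvPat x 1, pvPat x 0]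
def pvStepP (st : List Int × Int × Int) (p : Int) : List Int × Int × Int :=
  if st.2.1 > -1 then
    (PySem.List.pySetD st.1 st.2.2 (PySem.Int.bor (PySem.List.pyGetD st.1 st.2.2 0) (p <<< st.2.1.toNat)),
     st.2.1 - 3, st.2.2)
  else
    (PySem.List.pySetD
       (PySem.List.pySetD st.1 st.2.2 (PySem.Int.bor (PySem.List.pyGetD st.1 st.2.2 0) (p >>> (-st.2.1).toNat)))
       (st.2.2 + 1)
       (PySem.Int.bor
         (PySem.List.pyGetD
           (PySem.List.pySetD st.1 st.2.2 (PySem.Int.bor (PySem.List.pyGetD st.1 st.2.2 0) (p >>> (-st.2.1).toNat)))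
           (st.2.2 + 1) 0)
         (PySem.Int.band ((2 : Int) ^ (-st.2.1).toNat - 1) p <<< (8 + st.2.1).toNat)),
     8 + st.2.1 - 3, st.2.2 + 1)
def pvEnc (ps : List Int) : Int := ps.foldl (fun v p => PySem.Int.bor (v <<< 3) p) 0
def pvBytes (ps : List Int) : List Int :=
  [PySem.Int.band (pvEnc ps >>> 16) 255, PySem.Int.band (pvEnc ps >>> 8) 255, PySem.Int.band (pvEnc ps) 255]



set_option maxRecDepth 10000 in
lemma stepAP (x : Int) (st : List Int × Int × Int) (b : Int) :
    grbStepA x st b = pvStepP st (pvPat x b) := rfl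

lemma pyRange7 : PySem.List.pyRange 7 (-1) (-1) = [7,6,5,4,3,2,1,0] := by decide

lemma foldA (x : Int) (st : List Int × Int × Int) :
    (PySem.List.pyRange 7 (-1) (-1)).foldl (grbStepA x) st = List.foldl pvStepP st (pvPats x) := by
  rw [pyRange7]
  simp only [List.foldl, stepAP, pvPats]

lemma encB (x : Int) : grbEncB x = pvEnc (pvPats x) := by
  unfold grbEncB pvEnc pvPats pvPat
  rw [pyRange7]
  simp only [List.foldl]

lemma ifc (P : Prop) [inst : Decidable P] : (if P then (6:Int) else 4) = pvC (decide P) := by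
  by_cases h : P <;> simp [pvC, h]

set_option maxRecDepth 1000000 in
set_option maxHeartbeats 1000000 in
lemma core1 (t7 t6 t5 t4 t3 t2 t1 t0 : Bool) :
    List.foldl pvStepP ([0,0,0,0,0,0,0,0,0], 5, 0)
      [pvC t7, pvC t6, pvC t5, pvC t4, pvC t3, pvC t2, pvC t1, pvC t0]
    = (pvBytes [pvC t7, pvC t6, pvC t5, pvC t4, pvC t3, pvC t2, pvC t1, pvC t0] ++ [0,0,0,0,0,0], -3, 2) := by
  revert t7 t6 t5 t4 t3 t2 t1 t0; decide

lemma pats_eq (x : Int) : pvPats x =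
    [pvC (decide (PySem.Int.band x (1 <<< (7:Int).toNat) ≠ 0)),
     pvC (decide (PySem.Int.band x (1 <<< (6:Int).toNat) ≠ 0)),
     pvC (decide (PySem.Int.band x (1 <<< (5:Int).toNat) ≠ 0)),
     pvC (decide (PySem.Int.band x (1 <<< (4:Int).toNat) ≠ 0)),
     pvC (decide (PySem.Int.band x (1 <<< (3:Int).toNat) ≠ 0)),
     pvC (decide (PySem.Int.band x (1 <<< (2:Int).toNat) ≠ 0)),
     pvC (decide (PySem.Int.band x (1 <<< (1:Int).toNat) ≠ 0)),
     pvC (decide (PySem.Int.band x (1 <<< (0:Int).toNat) ≠ 0))] := by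
  simp only [pvPats, pvPat, ifc]


set_option maxRecDepth 1000000 in
set_option maxHeartbeats 1000000 in
lemma coreMid (t7 t6 t5 t4 t3 t2 t1 t0 : Bool) :
    List.foldl pvStepP ([pvC t7 <<< 5, 0,0,0,0,0], 2, 0)
      [pvC t6, pvC t5, pvC t4, pvC t3, pvC t2, pvC t1, pvC t0]
    = (pvBytes [pvC t7, pvC t6, pvC t5, pvC t4, pvC t3, pvC t2, pvC t1, pvC t0] ++ [0,0,0], -3, 2) := by
  revert t7 t6 t5 t4 t3 t2 t1 t0; decide

set_option maxRecDepth 1000000 in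
set_option maxHeartbeats 1000000 in
lemma coreLast (t7 t6 t5 t4 t3 t2 t1 t0 : Bool) :
    List.foldl pvStepP ([pvC t7 <<< 5, 0,0], 2, 0)
      [pvC t6, pvC t5, pvC t4, pvC t3, pvC t2, pvC t1, pvC t0]
    = (pvBytes [pvC t7, pvC t6, pvC t5, pvC t4, pvC t3, pvC t2, pvC t1, pvC t0], -3, 2) := by
  revert t7 t6 t5 t4 t3 t2 t1 t0; decide


lemma stepNeg3Mid (t : Bool) (r : Int) :
    pvStepP (r :: [0,0,0,0,0,0], -3, 0) (pvC t) = (r :: pvC t <<< 5 :: [0,0,0,0,0], 2, 1) := by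
  cases t <;>
    simp [pvStepP, pvC, PySem.List.pySetD, PySem.List.pySet?, PySem.List.pyIdx?,
      PySem.List.pyGetD, PySem.List.pyGet?] <;>
    refine ⟨?_, by decide⟩ <;>
    simp [show ((4:Int) >>> (3:Nat)) = 0 from by decide, show ((6:Int) >>> (3:Nat)) = 0 from by decide]

lemma stepNeg3Last (t : Bool) (r : Int) :
    pvStepP (r :: [0,0,0], -3, 0) (pvC t) = (r :: pvC t <<< 5 :: [0,0], 2, 1) := by
  cases t <;>
    simp [pvStepP, pvC, PySem.List.pySetD, PySem.List.pySet?, PySem.List.pyIdx?,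
      PySem.List.pyGetD, PySem.List.pyGet?] <;>
    refine ⟨?_, by decide⟩ <;>
    simp [show ((4:Int) >>> (3:Nat)) = 0 from by decide, show ((6:Int) >>> (3:Nat)) = 0 from by decide]

lemma pvStepP_idx_nonneg (l : List Int) (s k p : Int) (hk : 0 ≤ k) :
    0 ≤ (pvStepP (l, s, k) p).2.2 := by
  unfold pvStepP; split_ifs <;> simp <;> omega

set_option maxRecDepth 8192 in
lemma pvStepP_cons (a : Int) (l : List Int) (s k p : Int) (hk : 0 ≤ k) :
    pvStepP (a :: l, s, k + 1) p =
      (a :: (pvStepP (l, s, k) p).1, (pvStepP (l, s, k) p).2.1, (pvStepP (l, s, k) p).2.2 + 1) := by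
  obtain ⟨n, rfl⟩ : ∃ n : Nat, k = (n : Int) := ⟨k.toNat, by omega⟩
  have h1 : (n : Int) + 1 = ((n + 1 : Nat) : Int) := by push_cast; ring
  have h2 : ((n + 1 : Nat) : Int) + 1 = ((n + 2 : Nat) : Int) := by push_cast; ring
  unfold pvStepP
  split_ifs <;>
    simp only [h1, h2, PySem.List.pySetD_natCast, PySem.List.pyGetD_natCast,
      List.set_cons_succ, List.getD_cons_succ, Prod.mk.injEq, and_true, eq_self_iff_true] <;>
    simp

lemma pvFold_cons (ps : List Int) : ∀ (a : Int) (l : List Int) (s k : Int), 0 ≤ k →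
    List.foldl pvStepP (a :: l, s, k + 1) ps
    = (a :: (List.foldl pvStepP (l, s, k) ps).1,
       (List.foldl pvStepP (l, s, k) ps).2.1,
       (List.foldl pvStepP (l, s, k) ps).2.2 + 1) := by
  induction ps with
  | nil => intro a l s k hk; simp
  | cons p ps ih =>
    intro a l s k hk
    simp only [List.foldl_cons]
    rw [pvStepP_cons a l s k p hk]
    rcases hX : pvStepP (l, s, k) p with ⟨l', s', k'⟩
    have hk' : 0 ≤ k' := by
      have := pvStepP_idx_nonneg l s k p hk
      rw [hX] at this; exact this
    exact ih a l' s' k' hk'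


lemma pvFold_peel (ps : List Int) (a : Int) (l : List Int) (s k k' : Int)
    (hk : k = k' + 1) (hk' : 0 ≤ k') :
    List.foldl pvStepP (a :: l, s, k) ps
    = (a :: (List.foldl pvStepP (l, s, k') ps).1,
       (List.foldl pvStepP (l, s, k') ps).2.1,
       (List.foldl pvStepP (l, s, k') ps).2.2 + 1) := by
  subst hk; exact pvFold_cons ps a l s k' hk'

lemma pvByteMid (t7 t6 t5 t4 t3 t2 t1 t0 : Bool) (r : Int) :
    List.foldl pvStepP (r :: [0,0,0,0,0,0], -3, 0)
      [pvC t7, pvC t6, pvC t5, pvC t4, pvC t3, pvC t2, pvC t1, pvC t0]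
    = (r :: (pvBytes [pvC t7, pvC t6, pvC t5, pvC t4, pvC t3, pvC t2, pvC t1, pvC t0] ++ [0,0,0]), -3, 3) := by
  rw [List.foldl_cons, stepNeg3Mid]
  rw [pvFold_peel _ _ _ _ _ 0 (by norm_num) le_rfl]
  rw [coreMid]
  rfl

lemma pvByteLast (t7 t6 t5 t4 t3 t2 t1 t0 : Bool) (r : Int) :
    List.foldl pvStepP (r :: [0,0,0], -3, 0)
      [pvC t7, pvC t6, pvC t5, pvC t4, pvC t3, pvC t2, pvC t1, pvC t0]
    = (r :: pvBytes [pvC t7, pvC t6, pvC t5, pvC t4, pvC t3, pvC t2, pvC t1, pvC t0], -3, 3) := by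
  rw [List.foldl_cons, stepNeg3Last]
  rw [pvFold_peel _ _ _ _ _ 0 (by norm_num) le_rfl]
  rw [coreLast]
  rfl

lemma pvBytes_cons (ps : List Int) (zs : List Int) :
    pvBytes ps ++ zs
    = PySem.Int.band (pvEnc ps >>> 16) 255 :: PySem.Int.band (pvEnc ps >>> 8) 255 ::
      PySem.Int.band (pvEnc ps) 255 :: zs := rfl

lemma altOne (a : Int) :
    grbToSpiData_py_alt [a] = pvBytes (pvPats a) ++ [0,0,0,0,0,0] := by
  simp [grbToSpiData_py_alt, PySem.List.enumerate, pvBytes_cons, pvBytes, ← encB,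
    PySem.List.pySetD, PySem.List.pySet?, PySem.List.pyIdx?]

lemma altTwo (a b : Int) :
    grbToSpiData_py_alt [a, b] = pvBytes (pvPats a) ++ pvBytes (pvPats b) ++ [0,0,0] := by
  simp [grbToSpiData_py_alt, PySem.List.enumerate, pvBytes_cons, pvBytes, ← encB,
    PySem.List.pySetD, PySem.List.pySet?, PySem.List.pyIdx?]

lemma altThree (a b c : Int) :
    grbToSpiData_py_alt [a, b, c]
    = pvBytes (pvPats a) ++ pvBytes (pvPats b) ++ pvBytes (pvPats c) := by
  simp [grbToSpiData_py_alt, PySem.List.enumerate, pvBytes_cons, pvBytes, ← encB,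
    PySem.List.pySetD, PySem.List.pySet?, PySem.List.pyIdx?]

lemma fold1 (x : Int) :
    List.foldl pvStepP ([0,0,0,0,0,0,0,0,0], 5, 0) (pvPats x)
    = (pvBytes (pvPats x) ++ [0,0,0,0,0,0], -3, 2) := by
  rw [pats_eq x, core1, ← pats_eq x]

lemma fold2 (a b : Int) :
    List.foldl pvStepP (List.foldl pvStepP ([0,0,0,0,0,0,0,0,0], 5, 0) (pvPats a)) (pvPats b)
    = (pvBytes (pvPats a) ++ (pvBytes (pvPats b) ++ [0,0,0]), -3, 5) := by
  rw [fold1 a, pvBytes_cons, pats_eq b]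
  rw [pvFold_peel _ _ _ _ _ 1 (by norm_num) (by norm_num)]
  rw [pvFold_peel _ _ _ _ _ 0 (by norm_num) le_rfl]
  rw [pvByteMid, ← pats_eq b]
  simp [pvBytes_cons]

lemma fold3 (a b c : Int) :
    List.foldl pvStepP
      (List.foldl pvStepP (List.foldl pvStepP ([0,0,0,0,0,0,0,0,0], 5, 0) (pvPats a)) (pvPats b))
      (pvPats c)
    = (pvBytes (pvPats a) ++ (pvBytes (pvPats b) ++ pvBytes (pvPats c)), -3, 8) := by
  rw [fold2 a b, pvBytes_cons, pvBytes_cons, pats_eq c]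
  rw [pvFold_peel _ _ _ _ _ 4 (by norm_num) (by norm_num)]
  rw [pvFold_peel _ _ _ _ _ 3 (by norm_num) (by norm_num)]
  rw [pvFold_peel _ _ _ _ _ 2 (by norm_num) (by norm_num)]
  rw [pvFold_peel _ _ _ _ _ 1 (by norm_num) (by norm_num)]
  rw [pvFold_peel _ _ _ _ _ 0 (by norm_num) le_rfl]
  rw [pvByteLast, ← pats_eq c]
  simp [pvBytes_cons]

lemma mainOne (a : Int) : grbToSpiData_py [a] = grbToSpiData_py_alt [a] := by
  simp only [grbToSpiData_py, List.foldl]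
  rw [foldA, fold1, altOne]

lemma mainTwo (a b : Int) : grbToSpiData_py [a, b] = grbToSpiData_py_alt [a, b] := by
  simp only [grbToSpiData_py, List.foldl]
  rw [foldA, foldA, fold2, altTwo]
  simp

lemma mainThree (a b c : Int) : grbToSpiData_py [a, b, c] = grbToSpiData_py_alt [a, b, c] := by
  simp only [grbToSpiData_py, List.foldl]
  rw [foldA, foldA, foldA, fold3, altThree]
  simp

-- ===== VERDICT (by name: the statement is the Claim_ definition above) =====
theorem grbToSpiData_py_spec : Claim_equal_grbToSpiData_py := by
  intro grb hdom hpre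
  unfold Spec_grbToSpiData_py
  rcases grb with _ | ⟨a, _ | ⟨b, _ | ⟨c, _ | ⟨d, l⟩⟩⟩⟩
  · rfl
  · exact mainOne a
  · exact mainTwo a b
  · exact mainThree a b c
  · exfalso
    simp only [Pre_grbToSpiData_py, List.length_cons] at hpre
    omega
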